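-- pv_equiv track=rewrite | github.com/forensicanalysis/elementary | scripts/scripts/elementary-services.py | _servicetype_from_bitmask
-- ===== SOURCE A (Python) =====
-- SERVICE_TYPES = {
--     # https://docs.microsoft.com/de-de/dotnet/api/system.serviceprocess.servicetype?view=netframework-4.7.2
--     0x1: "KernelDriver",
--     0x2: "FilesystemDriver",
--     0x4: "Adapter",
--     0x8: "RecognizerDriver",
--     0x10: "Win32OwnProcess",
--     0x20: "Win32ShareProcess",
--     0x100: "InteractiveProcess",
-- }
--
-- def _servicetype_from_bitmask(mask):
--     if not mask:
--         return ""
--     mask = int(mask)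
--     types = []
--     for bit in SERVICE_TYPES:
--         if bit & mask:
--             types.append(SERVICE_TYPES[bit])
--     return ', '.join(types)
-- ===== SOURCE B (Python) =====
-- SERVICE_TYPES = {
--     0x1: "KernelDriver",
--     0x2: "FilesystemDriver",
--     0x4: "Adapter",
--     0x8: "RecognizerDriver",
--     0x10: "Win32OwnProcess",
--     0x20: "Win32ShareProcess",
--     0x100: "InteractiveProcess",
-- }
--
-- def _servicetype_from_bitmask(mask):
--     if not mask:
--         return ""
--     m = int(mask) & 0x13F  # restrict to the known flag bits (their OR)
--     names = []
--     bit = 1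
--     while m:
--         if m & 1:
--             names.append(SERVICE_TYPES[bit])
--         m >>= 1
--         bit <<= 1
--     return ', '.join(names)
-- ===== Notes on version B (the rewrite author's own statement) =====
-- stated objective: alternative
-- what changed: B walks the set bits of m = mask & 0x13F with a shift/test loop (looking each reached bit up in the table) instead of scanning the fixed SERVICE_TYPES table and AND-ing every key against the mask.
import Mathlib
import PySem

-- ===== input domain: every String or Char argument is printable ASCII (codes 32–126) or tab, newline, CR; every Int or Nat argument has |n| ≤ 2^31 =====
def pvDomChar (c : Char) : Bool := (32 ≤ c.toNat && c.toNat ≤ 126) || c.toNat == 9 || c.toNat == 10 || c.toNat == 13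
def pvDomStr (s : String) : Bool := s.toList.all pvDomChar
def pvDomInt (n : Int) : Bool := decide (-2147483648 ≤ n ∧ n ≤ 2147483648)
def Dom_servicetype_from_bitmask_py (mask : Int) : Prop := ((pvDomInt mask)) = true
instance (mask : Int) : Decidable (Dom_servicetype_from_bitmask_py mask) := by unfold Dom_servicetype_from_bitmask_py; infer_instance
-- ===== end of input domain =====

-- B joins the service names by scanning the set bits of mask & 0x13F instead of scanning the
-- SERVICE_TYPES table against the mask (alternative decomposition, same cost).

-- ===== PORT A =====
-- SERVICE_TYPES: dict literal as association list in insertion order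
def pvServiceTypes : List (Int × String) :=
  [(0x1, "KernelDriver"), (0x2, "FilesystemDriver"), (0x4, "Adapter"),
   (0x8, "RecognizerDriver"), (0x10, "Win32OwnProcess"), (0x20, "Win32ShareProcess"),
   (0x100, "InteractiveProcess")]

-- 'types = []; for bit in SERVICE_TYPES: if bit & mask: types.append(SERVICE_TYPES[bit])'
-- (iterating the dict yields its key/value pairs in insertion order; 'if bit & mask:' is int truthiness, i.e. ≠ 0)
def pvATypes (mask : Int) : List String :=
  pvServiceTypes.foldl (fun types p => if PySem.Int.band p.1 mask ≠ 0 then types ++ [p.2] else types) []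

-- 'if not mask: return ""' then 'mask = int(mask)' (identity on int) then the loop and ', '.join(types)
def servicetype_from_bitmask_py (mask : Int) : String :=
  if mask = 0 then ""
  else PySem.Str.join ", " (pvATypes mask)

-- ===== PORT B =====
-- SERVICE_TYPES[bit]: the loop only consults bits set in m ⊆ 0x13F, so the last reachable key is 0x100
def pvServiceTypeName (bit : Nat) : String :=
  if bit = 1 then "KernelDriver"
  else if bit = 2 then "FilesystemDriver"
  else if bit = 4 then "Adapter"
  else if bit = 8 then "RecognizerDriver"
  else if bit = 16 then "Win32OwnProcess"
  else if bit = 32 then "Win32ShareProcess"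
  else "InteractiveProcess"

-- 'while m: if m & 1: names.append(SERVICE_TYPES[bit]); m >>= 1; bit <<= 1'
-- m = mask & 0x13F is a nonnegative int throughout, ported as Nat (exact); the extra fuel
-- argument (initially m, and bitlen m ≤ m steps are taken) only makes the recursion structural.
def pvBitScan : Nat → Nat → Nat → List String
  | 0, _, _ => []
  | fuel + 1, m, bit =>
    if m = 0 then []
    else (if m &&& 1 = 1 then [pvServiceTypeName bit] else []) ++
         pvBitScan fuel (m >>> 1) (bit <<< 1)

def servicetype_from_bitmask_py_alt (mask : Int) : String :=
  if mask = 0 then ""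
  else
    let m := (PySem.Int.band mask 319).toNat   -- m = int(mask) & 0x13F (nonnegative, so toNat is exact)
    PySem.Str.join ", " (pvBitScan m m 1)

-- ===== PRECONDITION & SPEC =====
def Spec_servicetype_from_bitmask_py (mask : Int) (out : String) : Prop := out = servicetype_from_bitmask_py_alt mask
instance (mask : Int) (out : String) : Decidable (Spec_servicetype_from_bitmask_py mask out) := by unfold Spec_servicetype_from_bitmask_py; infer_instance

-- ===== CLAIM (what is proved, stated in full; the proofs are below) =====
def Claim_equal_servicetype_from_bitmask_py : Prop := ∀ (mask : Int), Dom_servicetype_from_bitmask_py mask → Spec_servicetype_from_bitmask_py mask (servicetype_from_bitmask_py mask)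

-- ===== LEMMAS AND PROOFS =====

-- mask & 0x13F is a natural number ≤ 0x13F
theorem pv_land319 (m : Nat) : (m &&& 319) &&& 319 = m &&& 319 := by
  rw [Nat.land_assoc, show (319 : Nat) &&& 319 = 319 from by decide]

set_option maxRecDepth 100000 in
theorem pv_sub_mask : ∀ s : Fin 320, s.val &&& 319 = s.val → (319 - s.val) &&& 319 = 319 - s.val := by
  decide

theorem pv_band319 (mask : Int) :
    ∃ t : Nat, t ≤ 319 ∧ t &&& 319 = t ∧ PySem.Int.band mask 319 = (t : Int) := by
  have h319 : (319 : Int).toNat = 319 := rfl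
  unfold PySem.Int.band
  split_ifs with h1 h2 h3
  · exact ⟨mask.toNat &&& (319 : Int).toNat,
      by simpa [h319] using Nat.and_le_right, by simpa [h319] using pv_land319 mask.toNat, rfl⟩
  · omega
  · refine ⟨(319 : Int).toNat - ((319 : Int).toNat &&& (-mask - 1).toNat), by rw [h319]; omega, ?_, rfl⟩
    set c : Nat := (-mask - 1).toNat with hc
    have hs : (319 &&& c) &&& 319 = 319 &&& c := by
      rw [Nat.land_comm 319 c]; exact pv_land319 c
    have hsle : 319 &&& c ≤ 319 := Nat.and_le_left
    rw [h319]
    exact pv_sub_mask ⟨319 &&& c, by omega⟩ hs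
  · omega

-- a known flag bit b (b & 0x13F = b) sees the same mask bits after m &= 0x13F
theorem pv_bit_band (b : Nat) (hb : b &&& 319 = b)
    (hsub : ∀ r : Fin 320, r.val &&& 319 = r.val → b &&& (319 - r.val) = b - (b &&& r.val))
    (mask : Int) :
    PySem.Int.band (b : Int) mask = PySem.Int.band (b : Int) (PySem.Int.band mask 319) := by
  have h319 : (319 : Int).toNat = 319 := rfl
  have hswap : ∀ m : Nat, b &&& (m &&& 319) = b &&& m := fun m => by
    rw [Nat.land_comm m 319, ← Nat.land_assoc, hb]
  have bandb : ∀ x : Int, PySem.Int.band (b : Int) x =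
      if 0 ≤ x then ((b &&& x.toNat : Nat) : Int) else ((b - (b &&& (-x - 1).toNat) : Nat) : Int) := by
    intro x
    unfold PySem.Int.band
    rw [if_pos (Int.natCast_nonneg b)]
    split_ifs with hx
    · rw [Int.toNat_natCast]
    · rw [Int.toNat_natCast]
  by_cases hm : 0 ≤ mask
  · have hinner : PySem.Int.band mask 319 = ((mask.toNat &&& 319 : Nat) : Int) := by
      unfold PySem.Int.band
      rw [if_pos hm, if_pos (by omega : (0:Int) ≤ 319), h319]
    rw [hinner, bandb mask, bandb ((mask.toNat &&& 319 : Nat) : Int), if_pos hm,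
      if_pos (Int.natCast_nonneg _), Int.toNat_natCast, hswap]
  · set c : Nat := (-mask - 1).toNat with hc
    have hinner : PySem.Int.band mask 319 = ((319 - (319 &&& c) : Nat) : Int) := by
      unfold PySem.Int.band
      rw [if_neg hm, if_pos (by omega : (0:Int) ≤ 319), h319]
    set r : Nat := 319 &&& c with hr
    have hrle : r ≤ 319 := hr ▸ Nat.and_le_left
    have hr2 : r &&& 319 = r := by rw [hr, Nat.land_comm 319 c]; exact pv_land319 c
    have hbc : b &&& r = b &&& c := by rw [hr, Nat.land_comm 319 c, hswap]
    have hfin : b &&& (319 - r) = b - (b &&& r) := hsub ⟨r, by omega⟩ hr2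
    rw [hinner, bandb mask, bandb (((319 - r : Nat) : Nat) : Int), if_neg hm,
      if_pos (Int.natCast_nonneg _), Int.toNat_natCast, hfin, hbc]

set_option maxRecDepth 100000 in
-- on the residual mask t ≤ 0x13F the table scan and the bit scan agree
theorem pv_scan_eq : ∀ t : Fin 320, t.val &&& 319 = t.val →
    pvATypes ((t.val : Nat) : Int) = pvBitScan t.val t.val 1 := by decide

set_option maxRecDepth 100000 in
theorem servicetype_from_bitmask_py_spec' (mask : Int) :
    servicetype_from_bitmask_py mask = servicetype_from_bitmask_py_alt mask := by
  unfold servicetype_from_bitmask_py servicetype_from_bitmask_py_alt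
  by_cases h0 : mask = 0
  · simp [h0]
  · obtain ⟨t, ht, htm, heq⟩ := pv_band319 mask
    simp only [if_neg h0, heq, Int.toNat_natCast]
    congr 1
    have pbb : ∀ b : Nat, b &&& 319 = b →
        (∀ r : Fin 320, r.val &&& 319 = r.val → b &&& (319 - r.val) = b - (b &&& r.val)) →
        PySem.Int.band (b : Int) mask = PySem.Int.band (b : Int) (t : Int) := by
      intro b h1 h2; rw [pv_bit_band b h1 h2 mask, heq]
    have e1 : PySem.Int.band 1 mask = PySem.Int.band 1 (t : Int) := by
      have := pbb 1 (by decide) (by decide); simpa using this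
    have e2 : PySem.Int.band 2 mask = PySem.Int.band 2 (t : Int) := by
      have := pbb 2 (by decide) (by decide); simpa using this
    have e4 : PySem.Int.band 4 mask = PySem.Int.band 4 (t : Int) := by
      have := pbb 4 (by decide) (by decide); simpa using this
    have e8 : PySem.Int.band 8 mask = PySem.Int.band 8 (t : Int) := by
      have := pbb 8 (by decide) (by decide); simpa using this
    have e16 : PySem.Int.band 16 mask = PySem.Int.band 16 (t : Int) := by
      have := pbb 16 (by decide) (by decide); simpa using this
    have e32 : PySem.Int.band 32 mask = PySem.Int.band 32 (t : Int) := by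
      have := pbb 32 (by decide) (by decide); simpa using this
    have e256 : PySem.Int.band 256 mask = PySem.Int.band 256 (t : Int) := by
      have := pbb 256 (by decide) (by decide); simpa using this
    have hA : pvATypes mask = pvATypes (t : Int) := by
      unfold pvATypes pvServiceTypes
      simp only [List.foldl_cons, List.foldl_nil]
      rw [e1, e2, e4, e8, e16, e32, e256]
    rw [hA]
    exact pv_scan_eq ⟨t, by omega⟩ htm

-- ===== VERDICT (by name: the statement is the Claim_ definition above) =====
theorem servicetype_from_bitmask_py_spec : Claim_equal_servicetype_from_bitmask_py := by
  intro mask _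
  unfold Spec_servicetype_from_bitmask_py
  exact servicetype_from_bitmask_py_spec' mask
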